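-- pv_equiv track=rewrite | github.com/ahmeddyounis/reflexor | src/reflexor/security/net_safety.py | _hostname_in_allowlist
-- ===== SOURCE A (Python) =====
-- def _hostname_in_allowlist(hostname: str, allowlist: list[str]) -> bool:
--     for entry in allowlist:
--         if not entry:
--             continue
--         if entry.startswith("*."):
--             base = entry[2:]
--             if hostname == base:
--                 continue
--             if hostname.endswith(f".{base}"):
--                 return True
--             continue
--
--         if hostname == entry:
--             return True
--     return False
-- ===== SOURCE B (Python) =====
-- def _hostname_in_allowlist(hostname: str, allowlist: list[str]) -> bool:
--     exact = set()
--     wildcard_bases = []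
--     for entry in allowlist:
--         if entry.startswith("*."):
--             wildcard_bases.append(entry[2:])
--         elif entry:
--             exact.add(entry)
--     return hostname in exact or any(
--         hostname.endswith(f".{base}") for base in wildcard_bases
--     )
-- ===== Notes on version B (the rewrite author's own statement) =====
-- stated objective: alternative
-- what changed: Replaces A's single loop with branch-heavy per-entry logic by a partition pass (exact-match set + wildcard-base list) followed by a set-membership test and one suffix scan; the redundant hostname==base guard disappears since a string never ends with a strictly longer '.base' suffix.
import Mathlib
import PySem

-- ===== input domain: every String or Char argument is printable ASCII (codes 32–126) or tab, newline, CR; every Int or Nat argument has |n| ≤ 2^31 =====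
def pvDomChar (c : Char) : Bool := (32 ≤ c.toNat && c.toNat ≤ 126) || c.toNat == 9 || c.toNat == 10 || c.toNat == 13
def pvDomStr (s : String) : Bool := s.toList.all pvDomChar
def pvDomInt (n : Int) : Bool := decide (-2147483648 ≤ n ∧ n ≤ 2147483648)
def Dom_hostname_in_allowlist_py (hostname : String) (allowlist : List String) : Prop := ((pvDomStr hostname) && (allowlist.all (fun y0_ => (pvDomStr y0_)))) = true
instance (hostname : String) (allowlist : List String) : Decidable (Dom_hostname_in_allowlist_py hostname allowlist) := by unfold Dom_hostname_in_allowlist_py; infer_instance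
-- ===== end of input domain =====

-- B partitions the allowlist into an exact-match set and wildcard bases, then checks membership / one suffix pass;
-- equivalence with A's single early-return loop is proved on the whole domain (no Pre_; both are total).

-- ===== PORT A =====
-- the for-loop of A as structural recursion over the allowlist (entries as List Char)
def pyAllowLoop (h : List Char) : List (List Char) → Bool
  | [] => false
  | e :: rest =>
    if e = [] then pyAllowLoop h rest
    else if PySem.Chars.startswith e ['*', '.'] then
      let base := PySem.Chars.slice e (some 2) none   -- entry[2:]
      if h = base then pyAllowLoop h rest
      else if PySem.Chars.endswith h ('.' :: base) then true   -- f".{base}"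
      else pyAllowLoop h rest
    else if h = e then true
    else pyAllowLoop h rest

def hostname_in_allowlist_py (hostname : String) (allowlist : List String) : Bool :=
  pyAllowLoop hostname.toList (allowlist.map String.toList)

-- ===== PORT B =====
-- the partition pass of B: accumulates (exact-match set, wildcard-base list)
def pyPartition (acc : PySem.Set (List Char) × List (List Char)) :
    List (List Char) → PySem.Set (List Char) × List (List Char)
  | [] => acc
  | e :: rest =>
    if PySem.Chars.startswith e ['*', '.'] then
      pyPartition (acc.1, acc.2 ++ [PySem.Chars.slice e (some 2) none]) rest
    else if e ≠ [] then
      pyPartition (PySem.Set.add acc.1 e, acc.2) rest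
    else
      pyPartition acc rest

def hostname_in_allowlist_py_alt (hostname : String) (allowlist : List String) : Bool :=
  let h := hostname.toList
  let p := pyPartition (PySem.Set.ofList [], []) (allowlist.map String.toList)
  PySem.Set.contains p.1 h || p.2.any (fun base => PySem.Chars.endswith h ('.' :: base))

-- ===== PRECONDITION & SPEC =====
def Spec_hostname_in_allowlist_py (hostname : String) (allowlist : List String) (out : Bool) : Prop := out = hostname_in_allowlist_py_alt hostname allowlist
instance (hostname : String) (allowlist : List String) (out : Bool) : Decidable (Spec_hostname_in_allowlist_py hostname allowlist out) := by unfold Spec_hostname_in_allowlist_py; infer_instance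

-- ===== CLAIM (what is proved, stated in full; the proofs are below) =====
def Claim_equal_hostname_in_allowlist_py : Prop := ∀ (hostname : String) (allowlist : List String), Dom_hostname_in_allowlist_py hostname allowlist → Spec_hostname_in_allowlist_py hostname allowlist (hostname_in_allowlist_py hostname allowlist)

-- ===== LEMMAS AND PROOFS =====

-- whether a single entry matches the hostname (used only in the proofs, by neither port)
def pvMatch (h e : List Char) : Bool :=
  if PySem.Chars.startswith e ['*', '.'] then
    PySem.Chars.endswith h ('.' :: PySem.Chars.slice e (some 2) none)
  else
    decide (e ≠ []) && decide (h = e)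

-- a string never ends with the strictly longer suffix '.'::itself
theorem endswith_dot_self_false (h : List Char) :
    PySem.Chars.endswith h ('.' :: h) = false := by
  by_contra hc
  have : PySem.Chars.endswith h ('.' :: h) = true := by
    cases hb : PySem.Chars.endswith h ('.' :: h) <;> simp_all
  have hs := (PySem.Chars.endswith_iff _ _).mp this
  have := hs.length_le
  simp at this

theorem pyAllowLoop_eq_any (h : List Char) (l : List (List Char)) :
    pyAllowLoop h l = l.any (pvMatch h) := by
  induction l with
  | nil => rfl
  | cons e rest ih =>
    simp only [pyAllowLoop, List.any_cons, pvMatch]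
    by_cases he : e = []
    · subst he
      simp [PySem.Chars.startswith, ih]
    · simp only [if_neg he]
      by_cases hw : PySem.Chars.startswith e ['*', '.'] = true
      · simp only [hw, if_pos hw]
        by_cases hb : h = PySem.Chars.slice e (some 2) none
        · rw [if_pos hb, ← hb, endswith_dot_self_false, ih]
          simp
        · rw [if_neg hb, ih]
          cases hend : PySem.Chars.endswith h ('.' :: PySem.Chars.slice e (some 2) none) <;>
            simp [hend]
      · simp only [Bool.not_eq_true] at hw
        rw [hw, if_neg (by simp [hw])]
        by_cases hh : h = e
        · simp [hh, he]
        · simp [hh, he, ih]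

theorem pyPartition_eq_any (h : List Char) (l : List (List Char))
    (acc : PySem.Set (List Char) × List (List Char)) :
    (PySem.Set.contains (pyPartition acc l).1 h
      || (pyPartition acc l).2.any (fun base => PySem.Chars.endswith h ('.' :: base)))
    = (PySem.Set.contains acc.1 h
      || acc.2.any (fun base => PySem.Chars.endswith h ('.' :: base))
      || l.any (pvMatch h)) := by
  induction l generalizing acc with
  | nil => simp [pyPartition]
  | cons e rest ih =>
    simp only [pyPartition, List.any_cons, pvMatch]
    by_cases hw : PySem.Chars.startswith e ['*', '.'] = true
    · rw [if_pos hw, ih]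
      simp only [hw, if_pos rfl, List.any_append, List.any_cons, List.any_nil]
      cases PySem.Set.contains acc.1 h <;>
        cases acc.2.any (fun base => PySem.Chars.endswith h ('.' :: base)) <;>
        cases PySem.Chars.endswith h ('.' :: PySem.Chars.slice e (some 2) none) <;> simp
    · simp only [Bool.not_eq_true] at hw
      rw [hw]
      by_cases he : e = []
      · rw [if_neg (by simp [hw]), if_neg (by simp [he]), ih]
        simp [he]
      · rw [if_neg (by simp [hw]), if_pos (by simp [he]), ih]
        have hc : PySem.Set.contains (PySem.Set.add acc.1 e) h
            = (PySem.Set.contains acc.1 h || decide (h = e)) := by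
          rw [PySem.Set.add_eq_ite]
          by_cases hm : e ∈ acc.1
          · rw [if_pos hm]
            by_cases hh : h = e
            · subst hh
              simp [PySem.Set.contains_eq_listContains, hm]
            · simp [hh]
          · rw [if_neg hm]
            simp [PySem.Set.contains_eq_listContains, eq_comm]
        rw [hc]
        cases PySem.Set.contains acc.1 h <;> cases hd : decide (h = e) <;>
          cases acc.2.any (fun base => PySem.Chars.endswith h ('.' :: base)) <;> simp [he] <;> simp_all

-- ===== VERDICT (by name: the statement is the Claim_ definition above) =====
theorem hostname_in_allowlist_py_spec : Claim_equal_hostname_in_allowlist_py := by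
  intro hostname allowlist _
  unfold Spec_hostname_in_allowlist_py hostname_in_allowlist_py hostname_in_allowlist_py_alt
  rw [pyAllowLoop_eq_any, pyPartition_eq_any]
  simp [PySem.Set.contains_eq_listContains, PySem.Set.ofList]
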